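-- pv_equiv track=rewrite | github.com/brianoin/mahjongproject | analysis.py | calculate_discard_danger
-- ===== SOURCE A (Python) =====
-- from collections import defaultdict, Counter
--
-- def calculate_discard_danger(visible):
--     discard_danger = {}
--     discard_counter = Counter()
--     tile_seen_by_player = {'p2': set(), 'p3': set(), 'p4': set()}
--
--     for player, tiles in visible['discards'].items():
--         for tile in tiles:
--             discard_counter[tile] += 1
--             if player in tile_seen_by_player:
--                 tile_seen_by_player[player].add(tile)
--
--     upper_player = 'p4'
--     lower_player = 'p2'
--     upper_discards = visible['discards'].get(upper_player, [])
--
--     all_tiles = [f"{i}{suit}" for suit in ['m', 'p', 's'] for i in range(1, 10)] + ['E', 'S', 'W', 'N', 'P', 'F', 'C']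
--
--     for tile in all_tiles:
--         count = discard_counter[tile]
--
--         if tile[0].isdigit():
--             num = int(tile[0])
--             if 4 <= num <= 6:
--                 base_danger = 10
--             elif num in [3, 7]:
--                 base_danger = 6
--             else:
--                 base_danger = 3
--         else:
--             base_danger = 5
--
--         player_safe = sum([1 for tiles in tile_seen_by_player.values() if tile in tiles])
--         discard_penalty = count * 4 + player_safe * 3
--
--         upper_to_lower_bonus = 0
--         if tile in upper_discards and tile not in tile_seen_by_player[lower_player]:
--             upper_to_lower_bonus = 4
--
--         danger_score = base_danger - discard_penalty + upper_to_lower_bonus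
--         discard_danger[tile] = max(danger_score, 0)
--
--     return discard_danger
-- ===== SOURCE B (Python) =====
-- def calculate_discard_danger(visible):
--     # Event-driven scoring: start every tile at its base danger, then apply
--     # penalty deltas per discard event, the upper->lower bonus, and clamp.
--     danger = {}
--     for suit in ['m', 'p', 's']:
--         for i in range(1, 10):
--             danger[f"{i}{suit}"] = 10 if 4 <= i <= 6 else 6 if i in (3, 7) else 3
--     for honor in ['E', 'S', 'W', 'N', 'P', 'F', 'C']:
--         danger[honor] = 5
--
--     lower_seen = set()
--     for player, tiles in visible['discards'].items():
--         for t in tiles: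
--             if t in danger:
--                 danger[t] -= 4
--         if player in ('p2', 'p3', 'p4'):
--             distinct = set(tiles)
--             for t in distinct:
--                 if t in danger:
--                     danger[t] -= 3
--             if player == 'p2':
--                 lower_seen = distinct
--
--     for t in set(visible['discards'].get('p4', [])):
--         if t in danger and t not in lower_seen:
--             danger[t] += 4
--
--     return {t: max(v, 0) for t, v in danger.items()}
-- ===== Notes on version B (the rewrite author's own statement) =====
-- stated objective: alternative
-- what changed: A aggregates counters/seen-sets first and then scores each of the 34 tiles with a branch ladder, an inner scan over the three seen-sets and a formula; B is event-driven: it initialises every tile at its base danger, mutates that score table in place with a -4 delta per discard event, a -3 delta per distinct sighting by p2/p3/p4 and a +4 upper-to-lower bonus, and finally clamps, so B has no per-tile scoring loop at all.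
import Mathlib
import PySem

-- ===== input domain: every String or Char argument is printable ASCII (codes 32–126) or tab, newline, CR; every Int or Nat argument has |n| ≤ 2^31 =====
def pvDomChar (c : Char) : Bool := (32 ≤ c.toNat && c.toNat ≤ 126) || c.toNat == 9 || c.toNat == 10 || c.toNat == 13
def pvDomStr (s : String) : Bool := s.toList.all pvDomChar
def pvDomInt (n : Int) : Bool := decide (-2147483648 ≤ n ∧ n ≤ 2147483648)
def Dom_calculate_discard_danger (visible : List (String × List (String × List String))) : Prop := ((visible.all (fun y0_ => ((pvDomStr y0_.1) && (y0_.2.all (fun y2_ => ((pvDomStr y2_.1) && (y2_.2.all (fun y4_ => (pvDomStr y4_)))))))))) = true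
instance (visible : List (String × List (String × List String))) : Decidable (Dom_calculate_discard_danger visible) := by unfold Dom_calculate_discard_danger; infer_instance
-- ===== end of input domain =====

-- B is event-driven: it seeds a base-danger score table for all 34 tiles and mutates it in place
-- per discard event (penalties, then the upper-to-lower bonus, then a clamp), instead of A's
-- aggregate-then-score-each-tile pass; objective: alternative.

-- ===== PORT A =====
-- all_tiles = [f"{i}{suit}" for suit in ['m','p','s'] for i in range(1,10)] + honors
def pvAllTiles : List String :=
  ((["m", "p", "s"] : List String).flatMap (fun suit =>
    (PySem.List.pyRange 1 10 1).map (fun i => PySem.Int.toStr i ++ suit)))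
  ++ ["E", "S", "W", "N", "P", "F", "C"]

-- A's base_danger branch ladder on tile[0] (the 0 in the IndexError arm is unreachable:
-- every tile A scores is a nonempty literal)
def pvBaseA (tile : String) : Int :=
  match PySem.Str.pyGet? tile 0 with
  | none => 0
  | some c =>
    if PySem.Chars.strIsdigit [c] then
      let num := (PySem.Int.ofChars? [c]).getD 0   -- int(tile[0]); isdigit guarantees a value
      if 4 ≤ num ∧ num ≤ 6 then 10
      else if num = 3 ∨ num = 7 then 6
      else 3
    else 5

-- body of A's aggregation loop over visible['discards'].items()
def pvStepA (st : PySem.Dict String Int × PySem.Dict String (PySem.Set String))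
    (pt : String × List String) :
    PySem.Dict String Int × PySem.Dict String (PySem.Set String) :=
  pt.2.foldl (fun st tile =>
    (st.1.modify tile 0 (· + 1),
     if st.2.contains pt.1 then st.2.modify pt.1 [] (fun s => PySem.Set.add s tile) else st.2)) st

def calculate_discard_danger (visible : List (String × List (String × List String))) :
    List (String × Int) :=
  match (PySem.Dict.ofList visible).get? "discards" with
  | none => []   -- KeyError: excluded by Pre_
  | some discardsL =>
    let discards := PySem.Dict.ofList discardsL
    let st := discards.items.foldl pvStepA
      (PySem.Dict.empty,
       PySem.Dict.ofList [("p2", PySem.Set.empty), ("p3", PySem.Set.empty), ("p4", PySem.Set.empty)])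
    let upper_discards := discards.getD "p4" []
    (pvAllTiles.foldl (fun (dd : PySem.Dict String Int) tile =>
      let count := st.1.getD tile 0
      let base_danger := pvBaseA tile
      let player_safe := ((st.2.values.filter (fun s => PySem.Set.contains s tile)).map
        (fun _ => (1 : Int))).sum
      let discard_penalty := count * 4 + player_safe * 3
      let bonus : Int :=
        if tile ∈ upper_discards ∧ ¬ tile ∈ st.2.getD "p2" [] then 4 else 0
      dd.insert tile (max (base_danger - discard_penalty + bonus) 0)) PySem.Dict.empty).items

-- ===== PORT B =====
-- the initial score table: danger[f"{i}{suit}"] = base, danger[honor] = 5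
def pvInitDanger : PySem.Dict String Int :=
  (["E", "S", "W", "N", "P", "F", "C"].foldl (fun d h => d.insert h 5)
    ((["m", "p", "s"] : List String).foldl (fun d suit =>
      (PySem.List.pyRange 1 10 1).foldl (fun d i =>
        d.insert (PySem.Int.toStr i ++ suit)
          (if 4 ≤ i ∧ i ≤ 6 then (10 : Int) else if i = 3 ∨ i = 7 then 6 else 3)) d)
      PySem.Dict.empty))

-- body of B's event loop: -4 per discard, -3 per distinct sighting by p2/p3/p4, track p2's set
def pvStepB (st : PySem.Dict String Int × PySem.Set String) (pt : String × List String) :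
    PySem.Dict String Int × PySem.Set String :=
  let d1 := pt.2.foldl (fun d t => if d.contains t then d.modify t 0 (· - 4) else d) st.1
  if pt.1 = "p2" ∨ pt.1 = "p3" ∨ pt.1 = "p4" then
    let distinct := PySem.Set.ofList pt.2
    let d2 := distinct.foldl (fun d t => if d.contains t then d.modify t 0 (· - 3) else d) d1
    (d2, if pt.1 = "p2" then distinct else st.2)
  else (d1, st.2)

def calculate_discard_danger_alt (visible : List (String × List (String × List String))) :
    List (String × Int) :=
  match (PySem.Dict.ofList visible).get? "discards" with
  | none => []   -- KeyError, as in A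
  | some discardsL =>
    let discards := PySem.Dict.ofList discardsL
    let st := discards.items.foldl pvStepB (pvInitDanger, PySem.Set.empty)
    let d3 := (PySem.Set.ofList (discards.getD "p4" [])).foldl
      (fun d t => if d.contains t ∧ ¬ t ∈ st.2 then d.modify t 0 (· + 4) else d) st.1
    (d3.items.foldl (fun (dd : PySem.Dict String Int) p => dd.insert p.1 (max p.2 0))
      PySem.Dict.empty).items

-- ===== PRECONDITION & SPEC =====
-- Pre_ excludes exactly the inputs without a 'discards' key, on which A raises KeyError.
def Pre_calculate_discard_danger (visible : List (String × List (String × List String))) : Prop :=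
  "discards" ∈ visible.map Prod.fst
instance (visible : List (String × List (String × List String))) :
    Decidable (Pre_calculate_discard_danger visible) := by
  unfold Pre_calculate_discard_danger; infer_instance

def pvWitness_calculate_discard_danger : (List (String × List (String × List String))) :=
  [("discards", [("p1", ["1m", "E"]), ("p2", ["5p"])])]

def Spec_calculate_discard_danger (visible : List (String × List (String × List String)))
    (out : List (String × Int)) : Prop := out = calculate_discard_danger_alt visible
instance (visible : List (String × List (String × List String))) (out : List (String × Int)) :
    Decidable (Spec_calculate_discard_danger visible out) := by
  unfold Spec_calculate_discard_danger; infer_instance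

-- ===== CLAIM (what is proved, stated in full; the proofs are below) =====
def Claim_equal_calculate_discard_danger : Prop :=
  ∀ (visible : List (String × List (String × List String))),
    Dom_calculate_discard_danger visible → Pre_calculate_discard_danger visible →
      Spec_calculate_discard_danger visible (calculate_discard_danger visible)

-- ===== LEMMAS AND PROOFS =====

-- indicator used to relate A's three seen-sets to B's score deltas
def pvInd (s : PySem.Set String) (t : String) : Int := if t ∈ s then 1 else 0

lemma pvInd_nil (t : String) : pvInd [] t = 0 := by simp [pvInd]

lemma pv_keys_ofList {ν : Type} (l : List (String × ν)) :
    (PySem.Dict.ofList l).keys = PySem.Set.ofList (l.map Prod.fst) := by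
  simp only [PySem.Dict.ofList, PySem.Dict.update]
  rw [show (fun (d : PySem.Dict String ν) (x : String × ν) => d.insert x.1 x.2)
      = (fun d x => d.insert ((fun (y : String × ν) => y.1) x)
          ((fun (_ : PySem.Dict String ν) (y : String × ν) => y.2) d x)) from rfl]
  rw [PySem.Dict.keys_foldl_insert_key]
  simp [PySem.Set.update, PySem.Dict.keys_empty, PySem.Set.ofList]

-- A's inner loop over one player's tiles, on the literal three-key seen dict
lemma pv_foldA_inner (p : String) (ts : List String) (cnt : PySem.Dict String Int)
    (s2 s3 s4 : PySem.Set String) :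
    pvStepA (cnt, PySem.Dict.mk [("p2", s2), ("p3", s3), ("p4", s4)]) (p, ts)
    = (ts.foldl (fun d t => d.modify t 0 (· + 1)) cnt,
       PySem.Dict.mk [("p2", if p = "p2" then ts.foldl PySem.Set.add s2 else s2),
                      ("p3", if p = "p3" then ts.foldl PySem.Set.add s3 else s3),
                      ("p4", if p = "p4" then ts.foldl PySem.Set.add s4 else s4)]) := by
  induction ts generalizing cnt s2 s3 s4 with
  | nil => simp [pvStepA]
  | cons t ts ih =>
    simp only [pvStepA, List.foldl_cons] at ih ⊢
    by_cases hp2 : p = "p2"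
    · subst hp2
      rw [show (PySem.Dict.mk [("p2", s2), ("p3", s3), ("p4", s4)]).contains "p2" = true by
            simp [PySem.Dict.contains],
          show (PySem.Dict.mk [("p2", s2), ("p3", s3), ("p4", s4)]).modify "p2" []
              (fun s => PySem.Set.add s t)
            = PySem.Dict.mk [("p2", PySem.Set.add s2 t), ("p3", s3), ("p4", s4)] by
            simp [PySem.Dict.modify, PySem.Dict.insert, PySem.Dict.getD, PySem.Dict.get?,
              PySem.Dict.contains]]
      simpa using ih (cnt.modify t 0 (· + 1)) (PySem.Set.add s2 t) s3 s4
    · by_cases hp3 : p = "p3"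
      · subst hp3
        rw [show (PySem.Dict.mk [("p2", s2), ("p3", s3), ("p4", s4)]).contains "p3" = true by
              simp [PySem.Dict.contains],
            show (PySem.Dict.mk [("p2", s2), ("p3", s3), ("p4", s4)]).modify "p3" []
                (fun s => PySem.Set.add s t)
              = PySem.Dict.mk [("p2", s2), ("p3", PySem.Set.add s3 t), ("p4", s4)] by
              simp [PySem.Dict.modify, PySem.Dict.insert, PySem.Dict.getD, PySem.Dict.get?,
                PySem.Dict.contains]]
        simpa using ih (cnt.modify t 0 (· + 1)) s2 (PySem.Set.add s3 t) s4
      · by_cases hp4 : p = "p4"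
        · subst hp4
          rw [show (PySem.Dict.mk [("p2", s2), ("p3", s3), ("p4", s4)]).contains "p4" = true by
                simp [PySem.Dict.contains],
              show (PySem.Dict.mk [("p2", s2), ("p3", s3), ("p4", s4)]).modify "p4" []
                  (fun s => PySem.Set.add s t)
                = PySem.Dict.mk [("p2", s2), ("p3", s3), ("p4", PySem.Set.add s4 t)] by
                simp [PySem.Dict.modify, PySem.Dict.insert, PySem.Dict.getD, PySem.Dict.get?,
                  PySem.Dict.contains]]
          simpa using ih (cnt.modify t 0 (· + 1)) s2 s3 (PySem.Set.add s4 t)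
        · rw [show (PySem.Dict.mk [("p2", s2), ("p3", s3), ("p4", s4)]).contains p = false by
                simp [PySem.Dict.contains, hp2, hp3, hp4, Ne.symm]]
          simpa [hp2, hp3, hp4] using ih (cnt.modify t 0 (· + 1)) s2 s3 s4

-- a guarded "-= c" event fold keeps the key list and subtracts c per occurrence of a key
lemma pv_fold_sub (c : Int) (ts : List String) (d : PySem.Dict String Int)
    (hkeys : d.keys = pvAllTiles) :
    (ts.foldl (fun d t => if d.contains t then d.modify t 0 (· - c) else d) d).keys = pvAllTiles
    ∧ ∀ t ∈ pvAllTiles,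
        (ts.foldl (fun d t => if d.contains t then d.modify t 0 (· - c) else d) d).getD t 0
          = d.getD t 0 - c * (ts.count t : Int) := by
  induction ts generalizing d with
  | nil => exact ⟨hkeys, by simp⟩
  | cons u ts ih =>
    simp only [List.foldl_cons]
    by_cases hu : d.contains u
    · rw [if_pos hu]
      have hk' : (d.modify u 0 (· - c)).keys = pvAllTiles := by
        rw [PySem.Dict.keys_modify, PySem.Dict.keys_insert_of_contains _ _ hu, hkeys]
      obtain ⟨hk2, hv2⟩ := ih _ hk'
      refine ⟨hk2, fun t ht => ?_⟩
      rw [hv2 t ht, PySem.Dict.getD_modify]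
      by_cases htu : t = u
      · subst htu
        simp; ring
      · rw [if_neg htu, List.count_cons, if_neg (by simpa using Ne.symm htu)]
        simp
    · rw [if_neg hu]
      obtain ⟨hk2, hv2⟩ := ih _ hkeys
      refine ⟨hk2, fun t ht => ?_⟩
      have htu : u ≠ t := by
        intro h; subst h
        rw [PySem.Dict.contains_eq_decide_mem_keys, hkeys] at hu
        simp [ht] at hu
      rw [hv2 t ht, List.count_cons, if_neg (by simpa using htu)]
      simp

-- the bonus fold over a duplicate-free list adds 4 exactly on its members outside `low`
lemma pv_fold_bonus (ts : List String) (low : PySem.Set String) (d : PySem.Dict String Int)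
    (hnd : ts.Nodup) (hkeys : d.keys = pvAllTiles) :
    (ts.foldl (fun d t => if d.contains t ∧ ¬ t ∈ low then d.modify t 0 (· + 4) else d) d).keys
      = pvAllTiles
    ∧ ∀ t ∈ pvAllTiles,
        (ts.foldl (fun d t => if d.contains t ∧ ¬ t ∈ low then d.modify t 0 (· + 4) else d)
          d).getD t 0
          = d.getD t 0 + (if t ∈ ts ∧ ¬ t ∈ low then 4 else 0) := by
  induction ts generalizing d with
  | nil => exact ⟨hkeys, by simp⟩
  | cons u ts ih =>
    rw [List.nodup_cons] at hnd
    simp only [List.foldl_cons]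
    by_cases hg : d.contains u ∧ ¬ u ∈ low
    · rw [if_pos hg]
      have hk' : (d.modify u 0 (· + 4)).keys = pvAllTiles := by
        rw [PySem.Dict.keys_modify, PySem.Dict.keys_insert_of_contains _ _ hg.1, hkeys]
      obtain ⟨hk2, hv2⟩ := ih _ hnd.2 hk'
      refine ⟨hk2, fun t ht => ?_⟩
      rw [hv2 t ht, PySem.Dict.getD_modify]
      by_cases htu : t = u
      · subst htu
        simp [hnd.1, hg.2]
      · simp [htu]
    · rw [if_neg hg]
      obtain ⟨hk2, hv2⟩ := ih _ hnd.2 hkeys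
      refine ⟨hk2, fun t ht => ?_⟩
      rw [hv2 t ht]
      by_cases htu : t = u
      · subst htu
        have : ¬ (t ∈ t :: ts ∧ ¬ t ∈ low) := by
          intro h
          exact hg ⟨by rw [PySem.Dict.contains_eq_decide_mem_keys, hkeys]; simpa using ht, h.2⟩
        simp only [if_neg this]
        have : ¬ (t ∈ ts ∧ ¬ t ∈ low) := fun h => this ⟨List.mem_cons_of_mem _ h.1, h.2⟩
        simp [this]
      · simp [List.mem_cons, htu]

-- the two aggregation folds, related: B's score table tracks A's counters pointwise
lemma pv_fold_outer (L : List (String × List String)) (cnt : PySem.Dict String Int)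
    (s2 s3 s4 : PySem.Set String) (dng : PySem.Dict String Int)
    (hnd : (L.map Prod.fst).Nodup)
    (h2 : "p2" ∈ L.map Prod.fst → s2 = []) (h3 : "p3" ∈ L.map Prod.fst → s3 = [])
    (h4 : "p4" ∈ L.map Prod.fst → s4 = [])
    (hkeys : dng.keys = pvAllTiles)
    (hval : ∀ t ∈ pvAllTiles, dng.getD t 0
      = pvBaseA t - 4 * cnt.getD t 0 - 3 * (pvInd s2 t + pvInd s3 t + pvInd s4 t)) :
    ∃ s2' s3' s4' : PySem.Set String,
      (L.foldl pvStepA (cnt, PySem.Dict.mk [("p2", s2), ("p3", s3), ("p4", s4)])).2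
        = PySem.Dict.mk [("p2", s2'), ("p3", s3'), ("p4", s4')]
      ∧ (L.foldl pvStepB (dng, s2)).2 = s2'
      ∧ (L.foldl pvStepB (dng, s2)).1.keys = pvAllTiles
      ∧ ∀ t ∈ pvAllTiles, (L.foldl pvStepB (dng, s2)).1.getD t 0
          = pvBaseA t
            - 4 * (L.foldl pvStepA (cnt, PySem.Dict.mk [("p2", s2), ("p3", s3), ("p4", s4)])).1.getD t 0
            - 3 * (pvInd s2' t + pvInd s3' t + pvInd s4' t) := by
  induction L generalizing cnt s2 s3 s4 dng with
  | nil => exact ⟨s2, s3, s4, rfl, rfl, hkeys, by simpa using hval⟩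
  | cons pt L ih =>
    obtain ⟨p, ts⟩ := pt
    simp only [List.map_cons, List.nodup_cons] at hnd
    simp only [List.foldl_cons]
    rw [pv_foldA_inner]
    obtain ⟨hk1, hv1⟩ := pv_fold_sub 4 ts dng hkeys
    have hcnt : ∀ t, (ts.foldl (fun d t => d.modify t 0 (· + 1)) cnt).getD t 0
        = cnt.getD t 0 + (ts.count t : Int) := fun t =>
      PySem.Dict.getD_foldl_modify_add_one ts cnt t
    by_cases hp2 : p = "p2"
    · subst hp2
      have hs2 : s2 = [] := h2 (by simp)
      subst hs2
      simp only [pvStepB, ← PySem.Set.ofList_eq_foldl]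
      simp only [String.reduceEq, reduceIte]
      obtain ⟨hk2, hv2⟩ := pv_fold_sub 3 (PySem.Set.ofList ts) _ hk1
      refine ih _ _ _ _ _ hnd.2 (fun h => absurd h hnd.1)
        (fun h => h3 (List.mem_cons_of_mem _ h)) (fun h => h4 (List.mem_cons_of_mem _ h))
        hk2 ?_
      intro t ht
      rw [hv2 t ht, hv1 t ht, hval t ht, hcnt t]
      have : ((PySem.Set.ofList ts).count t : Int) = pvInd (PySem.Set.ofList ts) t := by
        by_cases hm : t ∈ PySem.Set.ofList ts
        · rw [List.count_eq_one_of_mem (PySem.Set.nodup_ofList ts) hm]; simp [pvInd, hm]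
        · rw [List.count_eq_zero_of_not_mem hm]; simp [pvInd, hm]
      rw [this]
      simp only [pvInd_nil]; ring
    · by_cases hp3 : p = "p3"
      · subst hp3
        have hs3 : s3 = [] := h3 (by simp)
        subst hs3
        simp only [pvStepB, ← PySem.Set.ofList_eq_foldl]
        simp only [String.reduceEq, reduceIte]
        obtain ⟨hk2, hv2⟩ := pv_fold_sub 3 (PySem.Set.ofList ts) _ hk1
        refine ih _ _ _ _ _ hnd.2 (fun h => h2 (List.mem_cons_of_mem _ h))
          (fun h => absurd h hnd.1) (fun h => h4 (List.mem_cons_of_mem _ h)) hk2 ?_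
        intro t ht
        rw [hv2 t ht, hv1 t ht, hval t ht, hcnt t]
        have : ((PySem.Set.ofList ts).count t : Int) = pvInd (PySem.Set.ofList ts) t := by
          by_cases hm : t ∈ PySem.Set.ofList ts
          · rw [List.count_eq_one_of_mem (PySem.Set.nodup_ofList ts) hm]; simp [pvInd, hm]
          · rw [List.count_eq_zero_of_not_mem hm]; simp [pvInd, hm]
        rw [this]
        simp only [pvInd_nil]; ring
      · by_cases hp4 : p = "p4"
        · subst hp4
          have hs4 : s4 = [] := h4 (by simp)
          subst hs4
          simp only [pvStepB, ← PySem.Set.ofList_eq_foldl]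
          simp only [String.reduceEq, reduceIte]
          obtain ⟨hk2, hv2⟩ := pv_fold_sub 3 (PySem.Set.ofList ts) _ hk1
          refine ih _ _ _ _ _ hnd.2 (fun h => h2 (List.mem_cons_of_mem _ h))
            (fun h => h3 (List.mem_cons_of_mem _ h)) (fun h => absurd h hnd.1) hk2 ?_
          intro t ht
          rw [hv2 t ht, hv1 t ht, hval t ht, hcnt t]
          have : ((PySem.Set.ofList ts).count t : Int) = pvInd (PySem.Set.ofList ts) t := by
            by_cases hm : t ∈ PySem.Set.ofList ts
            · rw [List.count_eq_one_of_mem (PySem.Set.nodup_ofList ts) hm]; simp [pvInd, hm]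
            · rw [List.count_eq_zero_of_not_mem hm]; simp [pvInd, hm]
          rw [this]
          simp only [pvInd_nil]; ring
        · have hcond : ¬ (p = "p2" ∨ p = "p3" ∨ p = "p4") := by simp [hp2, hp3, hp4]
          simp only [pvStepB, if_neg hcond, if_neg hp2, if_neg hp3, if_neg hp4]
          refine ih _ _ _ _ _ hnd.2 (fun h => h2 (List.mem_cons_of_mem _ h))
            (fun h => h3 (List.mem_cons_of_mem _ h)) (fun h => h4 (List.mem_cons_of_mem _ h))
            hk1 ?_
          intro t ht
          rw [hv1 t ht, hval t ht, hcnt t]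
          ring

-- B's initial table: key list and values (closed computations)
set_option maxRecDepth 4096 in
lemma pv_init_keys : pvInitDanger.keys = pvAllTiles := by decide

set_option maxRecDepth 4096 in
lemma pv_init_val : ∀ t ∈ pvAllTiles, pvInitDanger.getD t 0 = pvBaseA t := by decide

lemma pv_tiles_nodup : pvAllTiles.Nodup := by decide

-- A's per-tile scan over the three seen-sets is the indicator sum
lemma pv_safe_sum (a b c : PySem.Set String) (t : String) :
    ((([a, b, c].filter (fun s => PySem.Set.contains s t)).map (fun _ => (1 : Int))).sum)
    = pvInd a t + pvInd b t + pvInd c t := by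
  by_cases ha : t ∈ a <;> by_cases hb : t ∈ b <;> by_cases hc : t ∈ c <;>
    simp [PySem.Set.contains, pvInd, ha, hb, hc]

-- ===== VERDICT (by name: the statement is the Claim_ definition above) =====
set_option maxRecDepth 8192 in
theorem calculate_discard_danger_spec : Claim_equal_calculate_discard_danger := by
  intro visible _ hpre
  unfold Spec_calculate_discard_danger
  unfold calculate_discard_danger calculate_discard_danger_alt
  rcases hg : (PySem.Dict.ofList visible).get? "discards" with _ | dl
  · exfalso
    rw [PySem.Dict.get?_eq_none_iff_not_mem_keys] at hg
    exact hg (by rw [pv_keys_ofList]; exact (PySem.Set.mem_ofList _ _).mpr hpre)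
  · have hnd : ((PySem.Dict.ofList dl).items.map Prod.fst).Nodup :=
      PySem.Dict.nodup_keys_ofList dl
    obtain ⟨s2', s3', s4', hA2, hlow, hkeysF, hvalF⟩ :=
      pv_fold_outer (PySem.Dict.ofList dl).items PySem.Dict.empty [] [] [] pvInitDanger
        hnd (fun _ => rfl) (fun _ => rfl) (fun _ => rfl) pv_init_keys
        (by intro t ht; rw [pv_init_val t ht]; simp [pvInd, PySem.Dict.getD_empty])
    dsimp only
    rw [show (PySem.Dict.ofList [("p2", (PySem.Set.empty : PySem.Set String)),
            ("p3", PySem.Set.empty), ("p4", PySem.Set.empty)])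
          = PySem.Dict.mk [("p2", []), ("p3", []), ("p4", [])] from rfl,
        show (PySem.Set.empty : PySem.Set String) = [] from rfl,
        hA2, hlow]
    obtain ⟨hk3, hv3⟩ := pv_fold_bonus (PySem.Set.ofList ((PySem.Dict.ofList dl).getD "p4" []))
      s2' _ (PySem.Set.nodup_ofList _) hkeysF
    rw [PySem.Dict.items_eq_map_keys
          ((PySem.Set.ofList ((PySem.Dict.ofList dl).getD "p4" [])).foldl
            (fun d t => if d.contains t ∧ ¬ t ∈ s2' then d.modify t 0 (· + 4) else d)
            (((PySem.Dict.ofList dl).items.foldl pvStepB (pvInitDanger, ([] : PySem.Set String))).1))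
          (by rw [hk3]; exact pv_tiles_nodup) 0, hk3,
        List.foldl_map]
    refine congrArg PySem.Dict.items ?_
    apply PySem.List.foldl_congr_mem'
    intro tile htile acc
    dsimp only
    rw [show (PySem.Dict.mk [("p2", s2'), ("p3", s3'), ("p4", s4')]).values = [s2', s3', s4']
          from rfl,
        show (PySem.Dict.mk [("p2", s2'), ("p3", s3'), ("p4", s4')]).getD "p2" [] = s2'
          from rfl,
        pv_safe_sum, hv3 tile htile, hvalF tile htile]
    simp only [PySem.Set.mem_ofList]
    congr 1
    by_cases hb : tile ∈ (PySem.Dict.ofList dl).getD "p4" [] ∧ ¬ tile ∈ s2'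
    · simp only [if_pos hb]; ring_nf
    · simp only [if_neg hb]; ring_nf
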